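-- pv_equiv track=rewrite | github.com/johnwaldo/aidevops | .agents/scripts/email-to-markdown.py | _count_descendants
-- ===== SOURCE A (Python) =====
-- from typing import Dict, List, Optional, Tuple, NamedTuple
--
-- def _count_descendants(msg_id: str, thread_map: Dict[str, Dict],
--                        visited_desc: set) -> int:
--     """Recursively count all descendants of msg_id in the thread map."""
--     if msg_id in visited_desc:
--         return 0
--     visited_desc.add(msg_id)
--
--     count = 1
--     for mid, info in thread_map.items():
--         if info.get('in_reply_to') == msg_id and mid not in visited_desc:
--             count += _count_descendants(mid, thread_map, visited_desc)
--     return count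
-- ===== SOURCE B (Python) =====
-- def _count_descendants(msg_id: str, thread_map, visited_desc: set) -> int:
--     """Count msg_id and all its descendants via a precomputed children index.
--
--     Same mutation of visited_desc as the original (adds every counted id)."""
--     children = {}
--     for mid, info in thread_map.items():
--         parent = info.get('in_reply_to')
--         if parent is not None:
--             children.setdefault(parent, []).append(mid)
--
--     before = len(visited_desc)
--
--     def dfs(m):
--         if m in visited_desc:
--             return
--         visited_desc.add(m)
--         for child in children.get(m, []):
--             dfs(child)
--
--     dfs(msg_id)
--     return len(visited_desc) - before
-- ===== Notes on version B (the rewrite author's own statement) =====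
-- stated objective: alternative
-- what changed: B builds a children-by-parent index in one pass and does a DFS over child lists, counting new nodes by the growth of the visited set, instead of A's recursion that rescans the whole thread map at every counted node and sums recursive counts.
import Mathlib
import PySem

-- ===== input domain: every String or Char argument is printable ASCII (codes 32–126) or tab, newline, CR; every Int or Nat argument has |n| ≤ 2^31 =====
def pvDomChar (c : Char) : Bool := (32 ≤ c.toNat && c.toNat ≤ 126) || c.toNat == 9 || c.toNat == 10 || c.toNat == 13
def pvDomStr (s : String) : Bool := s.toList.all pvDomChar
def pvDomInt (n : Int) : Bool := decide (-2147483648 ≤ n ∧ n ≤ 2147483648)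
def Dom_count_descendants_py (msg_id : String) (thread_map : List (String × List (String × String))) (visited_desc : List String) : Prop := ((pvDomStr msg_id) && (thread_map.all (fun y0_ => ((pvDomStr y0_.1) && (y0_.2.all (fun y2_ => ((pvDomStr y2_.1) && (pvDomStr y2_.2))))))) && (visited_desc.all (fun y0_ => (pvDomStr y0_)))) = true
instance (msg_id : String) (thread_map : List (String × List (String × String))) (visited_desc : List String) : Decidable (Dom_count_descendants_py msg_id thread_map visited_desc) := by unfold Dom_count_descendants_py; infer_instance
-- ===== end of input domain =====

-- B replaces A's per-node rescans of the whole map by a children-by-parent index built once,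
-- counting via set growth (objective: alternative). A mutates visited_desc in place and
-- B performs the same mutation in Python; the equivalence proved here is about the return value.

-- ===== PORT A =====
-- A's recursion, with a fuel guard making the recursion total (fuel = number of map
-- entries + 1 always suffices; at fuel 0 the state is returned unchanged, which on
-- exhaustion can only happen for an already-visited id, where Python returns the same).
-- State is (count so far, visited set); the Python dicts arrive as association lists,
-- normalised exactly as Python's dict(pairs) by PySem.Dict.ofList.
def cdA : Nat → String → List (String × List (String × String)) → PySem.Set String → Int × PySem.Set String
  | 0, _, _, visited => (0, visited)
  | fuel+1, msg_id, tm, visited =>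
    if PySem.Set.contains visited msg_id then (0, visited)
    else
      tm.foldl (fun s e =>
        if ((PySem.Dict.ofList e.2).get? "in_reply_to" == some msg_id)
            && !(PySem.Set.contains s.2 e.1) then
          let r := cdA fuel e.1 tm s.2
          (s.1 + r.1, r.2)
        else s) (1, PySem.Set.add visited msg_id)

def count_descendants_py (msg_id : String) (thread_map : List (String × List (String × String))) (visited_desc : List String) : Int :=
  let tm := (PySem.Dict.ofList thread_map).items
  (cdA (tm.length + 1) msg_id tm (PySem.Set.ofList visited_desc)).1

-- ===== PORT B =====
-- children.setdefault(info.get('in_reply_to'), []).append(mid), skipping entries without a parent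
def childIndex (tm : List (String × List (String × String))) : PySem.Dict String (List String) :=
  tm.foldl (fun d e =>
    match (PySem.Dict.ofList e.2).get? "in_reply_to" with
    | some q => d.modify q [] (fun l => l ++ [e.1])
    | none => d) PySem.Dict.empty

-- B's dfs: returns the grown visited set; same fuel guard as A's port
def cdB : Nat → String → PySem.Dict String (List String) → PySem.Set String → PySem.Set String
  | 0, _, _, visited => visited
  | fuel+1, m, children, visited =>
    if PySem.Set.contains visited m then visited
    else
      (children.getD m []).foldl (fun w child => cdB fuel child children w)
        (PySem.Set.add visited m)

def count_descendants_py_alt (msg_id : String) (thread_map : List (String × List (String × String))) (visited_desc : List String) : Int :=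
  let tm := (PySem.Dict.ofList thread_map).items
  let children := childIndex tm
  let before := PySem.Set.ofList visited_desc
  let after := cdB (tm.length + 1) msg_id children before
  (after.length : Int) - (before.length : Int)

-- ===== PRECONDITION & SPEC =====
def Spec_count_descendants_py (msg_id : String) (thread_map : List (String × List (String × String))) (visited_desc : List String) (out : Int) : Prop := out = count_descendants_py_alt msg_id thread_map visited_desc
instance (msg_id : String) (thread_map : List (String × List (String × String))) (visited_desc : List String) (out : Int) : Decidable (Spec_count_descendants_py msg_id thread_map visited_desc out) := by unfold Spec_count_descendants_py; infer_instance

-- ===== CLAIM (what is proved, stated in full; the proofs are below) =====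
def Claim_equal_count_descendants_py : Prop := ∀ (msg_id : String) (thread_map : List (String × List (String × String))) (visited_desc : List String), Dom_count_descendants_py msg_id thread_map visited_desc → Spec_count_descendants_py msg_id thread_map visited_desc (count_descendants_py msg_id thread_map visited_desc)

-- ===== LEMMAS AND PROOFS =====

lemma getD_childIndex_aux (tm : List (String × List (String × String)))
    (d : PySem.Dict String (List String)) (p : String) :
    (tm.foldl (fun d e =>
      match (PySem.Dict.ofList e.2).get? "in_reply_to" with
      | some q => d.modify q [] (fun l => l ++ [e.1])
      | none => d) d).getD p []
      = d.getD p [] ++ ((tm.filter (fun e => (PySem.Dict.ofList e.2).get? "in_reply_to" == some p)).map (·.1)) := by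
  induction tm generalizing d with
  | nil => simp
  | cons e t ih =>
    cases hpar : (PySem.Dict.ofList e.2).get? "in_reply_to" with
    | none => simp [List.foldl_cons, hpar, ih]
    | some q =>
      simp only [List.foldl_cons, hpar, ih, List.filter_cons]
      by_cases hq : q = p
      · subst hq
        simp
      · simp [PySem.Dict.getD_modify, hq, Ne.symm hq]

lemma getD_childIndex (tm : List (String × List (String × String))) (p : String) :
    (childIndex tm).getD p []
      = ((tm.filter (fun e => (PySem.Dict.ofList e.2).get? "in_reply_to" == some p)).map (·.1)) := by
  simpa [PySem.Dict.getD_empty] using getD_childIndex_aux tm PySem.Dict.empty p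

lemma cdB_of_contains (fuel : Nat) (m : String) (ch : PySem.Dict String (List String))
    (v : PySem.Set String) (h : PySem.Set.contains v m = true) :
    cdB fuel m ch v = v := by
  cases fuel with
  | zero => rfl
  | succ f => rw [cdB, if_pos h]

lemma cdA_eq_cdB (fuel : Nat) :
    ∀ (m : String) (tm : List (String × List (String × String))) (v : PySem.Set String),
    cdA fuel m tm v
      = (((cdB fuel m (childIndex tm) v).length : Int) - (v.length : Int),
          cdB fuel m (childIndex tm) v) := by
  induction fuel with
  | zero => intro m tm v; simp [cdA, cdB]
  | succ f ih =>
    intro m tm v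
    rw [cdA, cdB]
    by_cases hv : PySem.Set.contains v m = true
    · rw [if_pos hv, if_pos hv]; simp
    · rw [if_neg hv, if_neg hv]
      have hnm : m ∉ v := by simpa using hv
      -- A's fold over the whole map = fold over the child list of m
      have hbody : (fun (s : Int × PySem.Set String) (e : String × List (String × String)) =>
          if ((PySem.Dict.ofList e.2).get? "in_reply_to" == some m)
              && !(PySem.Set.contains s.2 e.1) then
            let r := cdA f e.1 tm s.2
            (s.1 + r.1, r.2)
          else s)
        = (fun s e =>
            if ((PySem.Dict.ofList e.2).get? "in_reply_to" == some m) then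
              (fun (s : Int × PySem.Set String) (mid : String) =>
                if PySem.Set.contains s.2 mid then s
                else (s.1 + (cdA f mid tm s.2).1, (cdA f mid tm s.2).2)) s e.1
            else s) := by
        funext s e
        cases h1 : ((PySem.Dict.ofList e.2).get? "in_reply_to" == some m)
        · simp
        · cases h2 : PySem.Set.contains s.2 e.1
          · have h2' : e.1 ∉ s.2 := by simpa using h2
            simp [h2']
          · have h2' : e.1 ∈ s.2 := by simpa using h2
            simp [h2']
      rw [hbody, PySem.List.foldl_if_eq_foldl_filter,
        ← List.foldl_map (f := fun e => (e : String × List (String × String)).1)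
          (g := fun (s : Int × PySem.Set String) (mid : String) =>
            if PySem.Set.contains s.2 mid then s
            else (s.1 + (cdA f mid tm s.2).1, (cdA f mid tm s.2).2)),
        ← getD_childIndex]
      -- now both sides fold over the same child list; prove the invariant
      have key : ∀ (ms : List String) (c0 : Int) (w : PySem.Set String),
          ms.foldl (fun (s : Int × PySem.Set String) (mid : String) =>
            if PySem.Set.contains s.2 mid then s
            else (s.1 + (cdA f mid tm s.2).1, (cdA f mid tm s.2).2)) (c0, w)
          = (c0 + (((ms.foldl (fun w child => cdB f child (childIndex tm) w) w).length : Int)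
                - (w.length : Int)),
              ms.foldl (fun w child => cdB f child (childIndex tm) w) w) := by
        intro ms
        induction ms with
        | nil => intro c0 w; simp
        | cons mid t iht =>
          intro c0 w
          rw [List.foldl_cons, List.foldl_cons]
          by_cases hw : PySem.Set.contains w mid = true
          · rw [if_pos hw, cdB_of_contains f mid _ w hw, iht]
          · rw [if_neg hw, ih mid tm w, iht]
            simp only [Prod.mk.injEq]
            refine ⟨by ring, by trivial⟩
      rw [key]
      have hlen : (PySem.Set.add v m).length = v.length + 1 := by
        rw [PySem.Set.add_of_not_mem hnm, List.length_append, List.length_cons, List.length_nil]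
      rw [hlen]
      simp only [Prod.mk.injEq]
      refine ⟨by push_cast; ring, by trivial⟩

-- ===== VERDICT (by name: the statement is the Claim_ definition above) =====
theorem count_descendants_py_spec : Claim_equal_count_descendants_py := by
  intro msg_id thread_map visited_desc _
  unfold Spec_count_descendants_py count_descendants_py count_descendants_py_alt
  simp [cdA_eq_cdB]
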